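-- pv_equiv track=rewrite | github.com/JoonHyeok-hozy-Kim/algorithm_study | BaekJoon/Solutions/Week1/Sol_04_220914_1448.py | triangle_test
-- ===== SOURCE A (Python) =====
-- def triangle_test(set):
--     max_val = set[0]
--     rest = []
--     for i in range(1,3):
--         if set[i] > max_val:
--             rest.append(max_val)
--             max_val = set[i]
--         else:
--             rest.append(set[i])
--     rest_sum = sum(rest)
--     return rest_sum + max_val if rest_sum > max_val else -1
-- ===== SOURCE B (Python) =====
-- def triangle_test(set):
--     a, b, c = set[0], set[1], set[2]
--     if a + b > c and b + c > a and c + a > b: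
--         return a + b + c
--     return -1
-- ===== Notes on version B (the rewrite author's own statement) =====
-- stated objective: simpler
-- what changed: B never isolates a largest side: it tests the symmetric triangle inequality on all three unordered pairs (a+b>c, b+c>a, c+a>b) and returns the plain sum, instead of A's running-max scan with a rest list.
import Mathlib
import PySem

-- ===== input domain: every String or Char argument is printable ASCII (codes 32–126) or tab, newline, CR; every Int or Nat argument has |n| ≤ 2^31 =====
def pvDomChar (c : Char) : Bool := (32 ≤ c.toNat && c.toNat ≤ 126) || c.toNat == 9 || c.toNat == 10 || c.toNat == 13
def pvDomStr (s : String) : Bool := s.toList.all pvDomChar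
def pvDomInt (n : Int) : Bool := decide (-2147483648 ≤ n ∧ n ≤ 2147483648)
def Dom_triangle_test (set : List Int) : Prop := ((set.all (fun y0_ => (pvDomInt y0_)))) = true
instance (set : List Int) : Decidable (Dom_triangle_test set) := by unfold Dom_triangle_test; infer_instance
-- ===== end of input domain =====

-- B tests the symmetric triangle inequality on all three unordered pairs instead of
-- A's running-max scan with a rest list; objective: simpler.

-- ===== PORT A =====
def triangle_test (set : List Int) : Int :=
  let max_val := PySem.List.pyGetD set 0 0
  let st := (PySem.List.pyRange 1 3 1).foldl
    (fun (p : Int × List Int) i =>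
      let si := PySem.List.pyGetD set i 0
      if si > p.1 then (si, p.2 ++ [p.1]) else (p.1, p.2 ++ [si]))
    (max_val, [])
  let rest_sum := st.2.sum
  if rest_sum > st.1 then rest_sum + st.1 else -1

-- ===== PORT B =====
def triangle_test_alt (set : List Int) : Int :=
  let a := PySem.List.pyGetD set 0 0
  let b := PySem.List.pyGetD set 1 0
  let c := PySem.List.pyGetD set 2 0
  if a + b > c ∧ b + c > a ∧ c + a > b then a + b + c else -1

-- ===== PRECONDITION & SPEC =====
-- Pre_ excludes lists with fewer than 3 elements, on which A raises IndexError.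
def Pre_triangle_test (set : List Int) : Prop := 3 ≤ set.length
instance (set : List Int) : Decidable (Pre_triangle_test set) := by unfold Pre_triangle_test; infer_instance
def pvWitness_triangle_test : List Int := [3, 4, 5]

def Spec_triangle_test (set : List Int) (out : Int) : Prop := out = triangle_test_alt set
instance (set : List Int) (out : Int) : Decidable (Spec_triangle_test set out) := by unfold Spec_triangle_test; infer_instance

-- ===== CLAIM (what is proved, stated in full; the proofs are below) =====
def Claim_equal_triangle_test : Prop := ∀ (set : List Int), Dom_triangle_test set → Pre_triangle_test set → Spec_triangle_test set (triangle_test set)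

-- ===== LEMMAS AND PROOFS =====
lemma pvGet3_0 (a b c : Int) (t : List Int) : PySem.List.pyGetD (a :: b :: c :: t) 0 0 = a := by
  simp only [PySem.List.pyGetD, PySem.List.pyGet?, PySem.List.pyIdx?, List.length_cons]
  split_ifs <;> first | (exfalso; omega) | simp

lemma pvGet3_1 (a b c : Int) (t : List Int) : PySem.List.pyGetD (a :: b :: c :: t) 1 0 = b := by
  simp only [PySem.List.pyGetD, PySem.List.pyGet?, PySem.List.pyIdx?, List.length_cons]
  split_ifs <;> first | (exfalso; omega) | simp

lemma pvGet3_2 (a b c : Int) (t : List Int) : PySem.List.pyGetD (a :: b :: c :: t) 2 0 = c := by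
  simp only [PySem.List.pyGetD, PySem.List.pyGet?, PySem.List.pyIdx?, List.length_cons]
  split_ifs <;> first | (exfalso; omega) | simp

-- ===== VERDICT (by name: the statement is the Claim_ definition above) =====
theorem triangle_test_spec : Claim_equal_triangle_test := by
  intro set _ hpre
  unfold Pre_triangle_test at hpre
  match set, hpre with
  | x :: y :: z :: t, _ =>
    unfold Spec_triangle_test triangle_test triangle_test_alt
    rw [show PySem.List.pyRange 1 3 1 = [1, 2] from by decide]
    simp only [List.foldl, pvGet3_0, pvGet3_1, pvGet3_2]
    split_ifs <;>
      simp only [List.nil_append, List.cons_append, List.sum_cons, List.sum_nil] at * <;>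
      omega
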